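-- pv_equiv track=rewrite | github.com/chinitacode/Python_Learning | Practice/int_sequence.py | int_seq
-- ===== SOURCE A (Python) =====
-- def int_seq(a, b):
--     "a <= b"
--     if a == b:
--         return str(a)
--     if b % 2 == 1:
--         return '(' + int_seq(a, b-1) + ' + 1)'
--     if b < 2 * a:
--         return '(' + int_seq(a, b-1) + ' + 1)'
--     return int_seq(a, b//2) + ' * 2'
-- ===== SOURCE B (Python) =====
-- def int_seq(a, b):
--     "a <= b"
--     ops = []
--     cur = b
--     while cur != a:
--         if cur % 2 == 1 or cur < 2 * a:
--             ops.append('+')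
--             cur -= 1
--         else:
--             ops.append('*')
--             cur //= 2
--     core = str(a)
--     for op in reversed(ops):
--         core = '(' + core + ' + 1)' if op == '+' else core + ' * 2'
--     return core
-- ===== Notes on version B (the rewrite author's own statement) =====
-- stated objective: alternative
-- what changed: Replaces A's recursion (which wraps the result of a recursive call) by an explicit descent loop from b to a that collects the chosen operations, followed by a single reverse pass that builds the expression string from str(a) outward.
-- outside the precondition, e.g. on int_seq(-2, -1): A returns '(-2 + 1)', B returns '(-2 + 1)'; on int_seq(-1, -2): A returns '-1 * 2', B returns '-1 * 2'
import Mathlib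
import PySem

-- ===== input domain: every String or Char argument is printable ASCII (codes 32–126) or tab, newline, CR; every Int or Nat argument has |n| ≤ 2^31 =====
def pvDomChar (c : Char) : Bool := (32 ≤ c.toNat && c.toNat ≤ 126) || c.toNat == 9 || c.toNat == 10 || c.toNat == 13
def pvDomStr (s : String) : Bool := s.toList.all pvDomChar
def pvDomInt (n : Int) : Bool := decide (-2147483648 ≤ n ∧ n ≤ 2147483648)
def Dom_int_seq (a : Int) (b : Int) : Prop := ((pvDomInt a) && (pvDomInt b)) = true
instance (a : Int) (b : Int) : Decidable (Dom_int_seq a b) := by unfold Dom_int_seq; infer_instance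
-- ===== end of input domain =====

-- B replaces A's recursion by an iterative op-collecting descent plus one reverse building pass (alternative decomposition, same result).


-- ===== PORT A =====
-- fuel-indexed transliteration of A's recursion; fuel (b-a).toNat+1 suffices on Pre_
def int_seqF : Nat → Int → Int → String
  | 0, _, _ => ""
  | Nat.succ n, a, b =>
    if a = b then PySem.Int.toStr a
    else if PySem.Int.mod b 2 = 1 then "(" ++ int_seqF n a (b - 1) ++ " + 1)"
    else if b < 2 * a then "(" ++ int_seqF n a (b - 1) ++ " + 1)"
    else int_seqF n a (PySem.Int.floordiv b 2) ++ " * 2"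

def int_seq (a : Int) (b : Int) : String := int_seqF ((b - a).toNat + a.natAbs + b.natAbs + 1) a b

-- ===== PORT B =====
-- the while loop collecting ops ('+' for b-=1, '*' for b//=2), fuel as above
def int_seq_ops : Nat → Int → Int → List Char
  | 0, _, _ => []
  | Nat.succ n, a, cur =>
    if cur = a then []
    else if PySem.Int.mod cur 2 = 1 ∨ cur < 2 * a then '+' :: int_seq_ops n a (cur - 1)
    else '*' :: int_seq_ops n a (PySem.Int.floordiv cur 2)

def int_seq_step (core : String) (op : Char) : String :=
  if op = '+' then "(" ++ core ++ " + 1)" else core ++ " * 2"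

def int_seq_alt (a : Int) (b : Int) : String :=
  ((int_seq_ops ((b - a).toNat + a.natAbs + b.natAbs + 1) a b).reverse).foldl int_seq_step (PySem.Int.toStr a)

-- ===== PRECONDITION & SPEC =====
-- Pre_ excludes a > b and negative a < b, where A's recursion diverges (RecursionError) except at
-- scattered points (e.g. (-2,-1), (-1,-2)) on which A returns and B returns the same value anyway.
def Pre_int_seq (a : Int) (b : Int) : Prop := (0 ≤ a ∧ a ≤ b) ∨ a = b
instance (a : Int) (b : Int) : Decidable (Pre_int_seq a b) := by unfold Pre_int_seq; infer_instance
def pvWitness_int_seq : Int × Int := (1, 10)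

def Spec_int_seq (a : Int) (b : Int) (out : String) : Prop := out = int_seq_alt a b
instance (a : Int) (b : Int) (out : String) : Decidable (Spec_int_seq a b out) := by unfold Spec_int_seq; infer_instance

-- ===== CLAIM (what is proved, stated in full; the proofs are below) =====
def Claim_equal_int_seq : Prop := ∀ (a : Int) (b : Int), Dom_int_seq a b → Pre_int_seq a b → Spec_int_seq a b (int_seq a b)

-- ===== LEMMAS AND PROOFS =====
lemma int_seq_main : ∀ (n : Nat) (a b : Int), 0 ≤ a → a ≤ b → (b - a).toNat < n →
    int_seqF n a b = ((int_seq_ops n a b).reverse).foldl int_seq_step (PySem.Int.toStr a) := by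
  intro n
  induction n with
  | zero => intro a b _ _ h; omega
  | succ n ih =>
    intro a b h0 hle hfuel
    by_cases heq : a = b
    · simp [int_seqF, int_seq_ops, heq]
    · have hba : ¬ b = a := fun h => heq h.symm
      have hlt : a < b := lt_of_le_of_ne hle heq
      by_cases hodd : b % 2 = 1
      · rw [show int_seqF (n+1) a b = "(" ++ int_seqF n a (b - 1) ++ " + 1)" by
            simp [int_seqF, heq, hodd],
          show int_seq_ops (n+1) a b = '+' :: int_seq_ops n a (b - 1) by
            simp [int_seq_ops, hba, hodd]]
        rw [List.reverse_cons, List.foldl_append, ih a (b - 1) h0 (by omega) (by omega)]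
        simp [int_seq_step]
      · by_cases hsm : b < 2 * a
        · rw [show int_seqF (n+1) a b = "(" ++ int_seqF n a (b - 1) ++ " + 1)" by
              simp [int_seqF, heq, hodd, hsm],
            show int_seq_ops (n+1) a b = '+' :: int_seq_ops n a (b - 1) by
              simp [int_seq_ops, hba, hodd, hsm]]
          rw [List.reverse_cons, List.foldl_append, ih a (b - 1) h0 (by omega) (by omega)]
          simp [int_seq_step]
        · have hmod0 : b % 2 = 0 := by omega
          have hdvd : (2 : Int) ∣ b := Int.dvd_of_emod_eq_zero hmod0
          obtain ⟨k, hk⟩ := hdvd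
          have hfd : PySem.Int.floordiv b 2 = k := by
            rw [PySem.Int.floordiv_eq_ediv_of_pos (by omega)]; omega
          rw [show int_seqF (n+1) a b = int_seqF n a (PySem.Int.floordiv b 2) ++ " * 2" by
              simp [int_seqF, heq, hodd, hsm],
            show int_seq_ops (n+1) a b = '*' :: int_seq_ops n a (PySem.Int.floordiv b 2) by
              simp [int_seq_ops, hba, hodd, hsm]]
          rw [List.reverse_cons, List.foldl_append, hfd,
            ih a k h0 (by omega) (by omega)]
          simp [int_seq_step]

-- ===== VERDICT (by name: the statement is the Claim_ definition above) =====
theorem int_seq_spec : Claim_equal_int_seq := by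
  intro a b _ hpre
  unfold Spec_int_seq int_seq int_seq_alt
  rcases hpre with ⟨h0, hle⟩ | heq
  · exact int_seq_main _ a b h0 hle (by omega)
  · subst heq
    simp [int_seqF, int_seq_ops]
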